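-- pv_equiv track=rewrite | github.com/deeaion/ubb_cs | Year_2/Semester_2/Inteligenta_Artificiala/Laboratory_1/4/main.py | problema_4
-- ===== SOURCE A (Python) =====
-- def problema_4(text: str):
--     """
--     Cautam cuvintele care se repeta o singura data
--     :param text: textul in care vom cauta cuvintele care apar o singura data in text
--     :time_complexity: Theta(N)
--     :space_complexity: Theta(M) , unde M este numarul de cuvinte ce nu se repeta
--     :return: list: lista cuvintelor ce nu se repeta
--
--     """
--     words = text.split()
--     word_frequency = {}
--     # Theta(N)
--     for word in words:
--         if word in word_frequency:
--             word_frequency[word] = word_frequency.get(word) + 1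
--         else:
--             word_frequency[word] = 1
--     non_repeating_word: list[str] = []
--     for word in word_frequency.keys():
--         if word_frequency[word] == 1:
--             non_repeating_word.append(word)
--     return non_repeating_word
-- ===== SOURCE B (Python) =====
-- def problema_4(text: str):
--     """One-pass: maintain a seen set and an ordered dict of still-unique words."""
--     seen = set()
--     unique = {}
--     for word in text.split():
--         if word in seen:
--             unique.pop(word, None)
--         else:
--             seen.add(word)
--             unique[word] = None
--     return list(unique)
-- ===== Notes on version B (the rewrite author's own statement) =====
-- stated objective: alternative
-- what changed: Replaced A's two-pass count-then-filter (build a full frequency dict, then scan its keys for count 1) by a single pass that maintains a seen set and an insertion-ordered dict of still-unique words, deleting a word from it on its second occurrence and returning its keys.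
import Mathlib
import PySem

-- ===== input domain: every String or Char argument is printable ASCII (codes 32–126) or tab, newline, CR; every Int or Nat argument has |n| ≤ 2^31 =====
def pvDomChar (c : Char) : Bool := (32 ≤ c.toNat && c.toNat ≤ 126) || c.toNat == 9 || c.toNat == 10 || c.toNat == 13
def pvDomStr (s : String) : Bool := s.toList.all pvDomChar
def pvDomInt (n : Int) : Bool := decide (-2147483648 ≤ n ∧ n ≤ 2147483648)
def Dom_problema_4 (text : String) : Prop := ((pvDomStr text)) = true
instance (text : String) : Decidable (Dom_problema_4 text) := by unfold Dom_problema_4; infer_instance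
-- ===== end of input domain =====

-- B replaces A's count-then-filter two passes by a single pass keeping a seen set and an
-- ordered dict of still-unique words (objective: alternative decomposition, same O(n) cost).

-- ===== PORT A =====
def problema_4 (text : String) : List String :=
  let words := PySem.Str.split₀ text
  let word_frequency := words.foldl
    (fun d word =>
      if d.contains word then d.insert word ((d.get? word).getD 0 + 1)
      else d.insert word 1)
    (PySem.Dict.empty : PySem.Dict String Int)
  -- word_frequency[word]: word is drawn from word_frequency.keys, so the key is present
  -- and getD reads the stored value (exact)
  word_frequency.keys.foldl
    (fun non_repeating_word word =>
      if word_frequency.getD word 0 == 1 then non_repeating_word ++ [word]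
      else non_repeating_word)
    ([] : List String)

-- ===== PORT B =====
-- one loop step of Source B: pop from `unique` if already seen, else add to both
def pvStepB (st : PySem.Set String × PySem.Dict String Unit) (word : String) :
    PySem.Set String × PySem.Dict String Unit :=
  if PySem.Set.contains st.1 word then (st.1, st.2.erase word)
  else (PySem.Set.add st.1 word, st.2.insert word ())

def problema_4_alt (text : String) : List String :=
  ((PySem.Str.split₀ text).foldl pvStepB
    ((PySem.Set.empty : PySem.Set String), (PySem.Dict.empty : PySem.Dict String Unit))).2.keys

-- ===== PRECONDITION & SPEC =====
def Spec_problema_4 (text : String) (out : List String) : Prop := out = problema_4_alt text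
instance (text : String) (out : List String) : Decidable (Spec_problema_4 text out) := by unfold Spec_problema_4; infer_instance

-- ===== CLAIM (what is proved, stated in full; the proofs are below) =====
def Claim_equal_problema_4 : Prop := ∀ (text : String), Dom_problema_4 text → Spec_problema_4 text (problema_4 text)

-- ===== LEMMAS AND PROOFS =====

-- mapping fst past an items filter that only looks at the key
theorem pv_map_fst_filter {ν : Type} (l : List (String × ν)) (p : String → Bool) :
    (l.filter (fun q => p q.1)).map Prod.fst = (l.map Prod.fst).filter p := by
  induction l with
  | nil => rfl
  | cons a t ih => by_cases h : p a.1 <;> simp [h, ih]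

-- dict.pop(k, None) removes exactly the key k from the key list
theorem pv_keys_erase {ν : Type} (d : PySem.Dict String ν) (k : String) :
    (d.erase k).keys = d.keys.filter (fun x => !(x == k)) := by
  simp only [PySem.Dict.erase, PySem.Dict.keys]
  exact pv_map_fst_filter d.items (fun x => !(x == k))

-- A's result, characterised: first occurrences of the words of count 1, in order
theorem pv_A_char (ws : List String) (wf : PySem.Dict String Int)
    (hwf : wf = ws.foldl
        (fun d word =>
          if d.contains word then d.insert word ((d.get? word).getD 0 + 1)
          else d.insert word 1)
        (PySem.Dict.empty : PySem.Dict String Int)) :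
    wf.keys.foldl
        (fun non_repeating_word word =>
          if wf.getD word 0 == 1 then non_repeating_word ++ [word]
          else non_repeating_word)
        ([] : List String)
      = (PySem.Set.ofList ws).filter (fun w => List.count w ws == 1) := by
  have hf : (fun (d : PySem.Dict String Int) word =>
        if d.contains word then d.insert word ((d.get? word).getD 0 + 1)
        else d.insert word 1)
      = fun d word => d.insert word (d.getD word 0 + 1) := by
    funext d w
    by_cases h : d.contains w = true
    · simp [h, PySem.Dict.getD_eq_get?_getD]
    · have h' : d.contains w = false := by simpa using h
      simp [h', PySem.Dict.getD_of_not_contains d 0 h']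
  subst hwf
  rw [hf, PySem.Dict.foldl_insert_getD_add_one_eq_counter,
    PySem.List.foldl_append_if_eq_filter
      (fun w => (PySem.Dict.counter ws).getD w 0 == 1)]
  simp only [PySem.Dict.keys_counter, PySem.Dict.getD_counter, List.nil_append]
  refine List.filter_congr ?_
  intro w _
  rw [Bool.eq_iff_iff]
  simp

-- the one-pass invariant of B: seen = set(prefix), unique's keys = words unique so far, in order
theorem pv_B_inv (ws : List String) :
    (ws.foldl pvStepB ((PySem.Set.empty : PySem.Set String),
        (PySem.Dict.empty : PySem.Dict String Unit))).1 = PySem.Set.ofList ws ∧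
    (ws.foldl pvStepB ((PySem.Set.empty : PySem.Set String),
        (PySem.Dict.empty : PySem.Dict String Unit))).2.keys
      = (PySem.Set.ofList ws).filter (fun w => List.count w ws == 1) := by
  induction ws using List.reverseRecOn with
  | nil => exact ⟨rfl, rfl⟩
  | append_singleton l x ih =>
    obtain ⟨h1, h2⟩ := ih
    rw [List.foldl_append, List.foldl_cons, List.foldl_nil]
    set st := l.foldl pvStepB ((PySem.Set.empty : PySem.Set String),
        (PySem.Dict.empty : PySem.Dict String Unit)) with hst
    have hcountx : ∀ w : String, List.count w (l ++ [x])
        = List.count w l + (if w = x then 1 else 0) := by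
      intro w
      by_cases h : w = x
      · subst h; simp [List.count_append]
      · simp [List.count_append, h, Ne.symm h]
    by_cases hx : x ∈ l
    · have hofl : PySem.Set.ofList (l ++ [x]) = PySem.Set.ofList l := by
        rw [PySem.Set.ofList_append_singleton,
          PySem.Set.add_of_mem ((PySem.Set.mem_ofList l x).2 hx)]
      have hc : PySem.Set.contains st.1 x = true := by
        rw [h1, PySem.Set.contains_iff, PySem.Set.mem_ofList]; exact hx
      have hstep : pvStepB st x = (st.1, st.2.erase x) := by
        unfold pvStepB; rw [hc]; simp
      rw [hstep]
      constructor
      · rw [h1, hofl]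
      · rw [pv_keys_erase, h2, List.filter_filter, hofl]
        refine List.filter_congr ?_
        intro w hw
        rw [Bool.eq_iff_iff]
        by_cases hwx : w = x
        · subst hwx
          have hpos : 0 < List.count w l := List.count_pos_iff.2 hx
          simp [hcountx w]
          omega
        · simp [hcountx w, hwx]
    · have hofl : PySem.Set.ofList (l ++ [x]) = PySem.Set.ofList l ++ [x] := by
        rw [PySem.Set.ofList_append_singleton,
          PySem.Set.add_of_not_mem (fun h => hx ((PySem.Set.mem_ofList l x).1 h))]
      have hc : PySem.Set.contains st.1 x = false := by
        rw [h1]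
        simp only [Bool.eq_false_iff, ne_eq]
        intro h
        exact hx ((PySem.Set.mem_ofList l x).1 ((PySem.Set.contains_iff _ x).1 h))
      have hstep : pvStepB st x = (PySem.Set.add st.1 x, st.2.insert x ()) := by
        unfold pvStepB; rw [hc]; simp
      have hdc : st.2.contains x = false := by
        rw [PySem.Dict.contains_eq_decide_mem_keys, h2]
        simp only [decide_eq_false_iff_not]
        intro h
        exact hx ((PySem.Set.mem_ofList l x).1 (List.mem_of_mem_filter h))
      have hfeq : (PySem.Set.ofList l).filter (fun w => List.count w (l ++ [x]) == 1)
          = (PySem.Set.ofList l).filter (fun w => List.count w l == 1) := by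
        refine List.filter_congr ?_
        intro w hw
        have hwx : w ≠ x := fun h => hx (h ▸ (PySem.Set.mem_ofList l w).1 hw)
        simp [hcountx w, hwx]
      rw [hstep]
      constructor
      · rw [h1, hofl]
        exact PySem.Set.add_of_not_mem (fun h => hx ((PySem.Set.mem_ofList l x).1 h))
      · rw [PySem.Dict.keys_insert_of_not_contains _ () hdc, h2, hofl,
          List.filter_append, hfeq]
        have h0 : List.count x l = 0 := List.count_eq_zero.2 hx
        simp [h0]

-- ===== VERDICT (by name: the statement is the Claim_ definition above) =====
theorem problema_4_spec : Claim_equal_problema_4 := by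
  intro text _
  show problema_4 text = problema_4_alt text
  exact (pv_A_char (PySem.Str.split₀ text) _ rfl).trans
    ((pv_B_inv (PySem.Str.split₀ text)).2).symm
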